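-- pv_equiv track=rewrite | github.com/Seif-Sallam/Markdown-Live-Viewer | app.py | search_in_text
-- ===== SOURCE A (Python) =====
-- from typing import Dict, List, Optional, Any, Tuple
--
-- def search_in_text(text: str, query: str) -> List[Tuple[int, int]]:
--     """
--     Case-insensitive substring search. Returns spans (start,end).
--     Keep it simple; upgrade to ripgrep / Whoosh later if needed.
--     """
--     text_l = text.lower()
--     q = query.lower()
--     spans: List[Tuple[int, int]] = []
--     i = 0
--     while True:
--         j = text_l.find(q, i)
--         if j == -1:
--             break
--         spans.append((j, j + len(q)))
--         i = j + max(1, len(q))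
--         if len(spans) >= 20:  # cap per file
--             break
--     return spans
-- ===== SOURCE B (Python) =====
-- def search_in_text(text, query):
--     """
--     Case-insensitive substring search. Returns spans (start,end).
--     Two staged passes: (1) enumerate every (possibly overlapping) occurrence
--     of the lowered query in the lowered text; (2) greedily select the
--     non-overlapping ones left to right, capped at 20.
--     """
--     text_l = text.lower()
--     q = query.lower()
--     m = len(q)
--     hits = [i for i in range(len(text_l) - m + 1) if text_l[i:i + m] == q]
--     spans = []
--     last_end = 0
--     for i in hits:
--         if i < last_end:
--             continue
--         spans.append((i, i + m))
--         if len(spans) >= 20: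
--             break
--         last_end = i + max(1, m)
--     return spans
-- ===== Notes on version B (the rewrite author's own statement) =====
-- stated objective: alternative
-- what changed: Replaces A's incremental find-and-jump loop by two staged passes: first enumerate every (possibly overlapping) occurrence position of the lowered query, then greedily select the non-overlapping ones left to right with the 20-cap.
import Mathlib
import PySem

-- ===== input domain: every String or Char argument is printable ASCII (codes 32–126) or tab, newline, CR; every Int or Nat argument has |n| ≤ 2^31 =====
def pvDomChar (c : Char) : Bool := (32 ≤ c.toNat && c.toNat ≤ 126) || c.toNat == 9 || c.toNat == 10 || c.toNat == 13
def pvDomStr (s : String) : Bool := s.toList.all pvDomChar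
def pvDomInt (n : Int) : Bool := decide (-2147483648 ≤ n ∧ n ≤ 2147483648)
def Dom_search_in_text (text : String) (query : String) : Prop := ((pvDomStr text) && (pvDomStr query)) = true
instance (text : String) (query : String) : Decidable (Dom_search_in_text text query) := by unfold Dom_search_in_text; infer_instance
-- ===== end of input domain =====

-- B replaces A's incremental find-jump loop by two staged passes: first enumerate ALL
-- (possibly overlapping) occurrence positions, then greedily select the non-overlapping
-- ones left to right with the 20-cap (alternative decomposition, same asymptotic cost).

-- ===== PORT A =====
-- A's while-loop: each iteration either breaks or appends one span, and the loop breaks once 20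
-- spans are collected, so 20 units of fuel (one per append) cover every iteration that recurses.
def searchLoopA (tl q : List Char) (i : Int) (spans : List (Int × Int)) (fuel : Nat) : List (Int × Int) :=
  match fuel with
  | 0 => spans
  | Nat.succ fuel =>
    let j := PySem.Chars.findFrom tl q i none      -- j = text_l.find(q, i)
    if j = -1 then spans
    else
      let spans' := spans ++ [(j, j + (q.length : Int))]
      let i' := j + max 1 (q.length : Int)
      if 20 ≤ spans'.length then spans' else searchLoopA tl q i' spans' fuel

def search_in_text (text : String) (query : String) : List (Int × Int) :=
  let text_l := PySem.Str.lower text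
  let q := PySem.Str.lower query
  searchLoopA text_l.toList q.toList 0 [] 20

-- ===== PORT B =====
-- B pass 2: the for-loop over the hit list with accumulator (spans, last_end); `continue`
-- on an overlapping hit, `break` at 20 spans. Hit positions are range indices, hence Nat.
def selectSpansB (m : Nat) : List Nat → Nat → List (Int × Int) → List (Int × Int)
  | [], _, spans => spans
  | i :: rest, last_end, spans =>
    if i < last_end then selectSpansB m rest last_end spans
    else if 20 ≤ (spans ++ [((i : Int), (i : Int) + (m : Int))]).length
    then spans ++ [((i : Int), (i : Int) + (m : Int))]
    else selectSpansB m rest (i + max 1 m) (spans ++ [((i : Int), (i : Int) + (m : Int))])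

-- B pass 1 + driver. Python's range(len(text_l) - m + 1) is empty when m > len, which is
-- exactly Nat subtraction (len + 1) - m; the slice text_l[i:i+m] with 0 ≤ i is take m (drop i).
def search_in_text_alt (text : String) (query : String) : List (Int × Int) :=
  let text_l := PySem.Str.lower text
  let q := PySem.Str.lower query
  let tl := text_l.toList
  let ql := q.toList
  let m := ql.length
  let hits := (List.range ((tl.length + 1) - m)).filter (fun i => List.take m (List.drop i tl) == ql)
  selectSpansB m hits 0 []

-- ===== PRECONDITION & SPEC =====
def Spec_search_in_text (text : String) (query : String) (out : List (Int × Int)) : Prop := out = search_in_text_alt text query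
instance (text : String) (query : String) (out : List (Int × Int)) : Decidable (Spec_search_in_text text query out) := by unfold Spec_search_in_text; infer_instance

-- ===== CLAIM (what is proved, stated in full; the proofs are below) =====
def Claim_equal_search_in_text : Prop := ∀ (text : String) (query : String), Dom_search_in_text text query → Spec_search_in_text text query (search_in_text text query)

-- ===== LEMMAS AND PROOFS =====

-- the tail of B's hit list starting at position k
def hitsFrom (tl ql : List Char) (k : Nat) : List Nat :=
  (List.range' k ((tl.length + 1 - ql.length) - k)).filter (fun i => List.take ql.length (List.drop i tl) == ql)

lemma hitsFrom_zero (tl ql : List Char) :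
    hitsFrom tl ql 0 = (List.range ((tl.length + 1) - ql.length)).filter (fun i => List.take ql.length (List.drop i tl) == ql) := by
  simp [hitsFrom, List.range_eq_range']

lemma pred_iff (tl ql : List Char) (i : Nat) :
    (List.take ql.length (List.drop i tl) == ql) = true ↔ ql <+: tl.drop i := by
  rw [beq_iff_eq, List.prefix_iff_eq_take, eq_comm]

lemma hitsFrom_stop (tl ql : List Char) (k : Nat) (h : tl.length + 1 - ql.length ≤ k) :
    hitsFrom tl ql k = [] := by
  unfold hitsFrom
  rw [show tl.length + 1 - ql.length - k = 0 by omega]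
  rfl

lemma hitsFrom_step (tl ql : List Char) (k : Nat) (h : k < tl.length + 1 - ql.length) :
    hitsFrom tl ql k = (if ql <+: tl.drop k then [k] else []) ++ hitsFrom tl ql (k + 1) := by
  unfold hitsFrom
  rw [show tl.length + 1 - ql.length - k = (tl.length + 1 - ql.length - (k + 1)) + 1 by omega,
      List.range'_succ, List.filter_cons]
  by_cases hp : ql <+: tl.drop k
  · rw [if_pos ((pred_iff tl ql k).mpr hp)]; simp [hp]
  · rw [if_neg (by simpa [pred_iff tl ql k] using hp)]; simp [hp]

-- positions carrying no occurrence drop out of the hit list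
lemma hitsFrom_skip (tl ql : List Char) (d : Nat) :
    ∀ k, (∀ t, t < d → ¬ ql <+: tl.drop (k + t)) → hitsFrom tl ql k = hitsFrom tl ql (k + d) := by
  induction d with
  | zero => intro k _; rfl
  | succ d ih =>
    intro k h
    by_cases hk : k < tl.length + 1 - ql.length
    · rw [hitsFrom_step tl ql k hk, if_neg (by simpa using h 0 (by omega))]
      rw [show k + (d + 1) = (k + 1) + d by omega]
      exact ih (k + 1) (fun t ht => by
        have := h (t + 1) (by omega); rwa [show k + (t + 1) = k + 1 + t by omega] at this)
    · rw [hitsFrom_stop tl ql k (by omega), hitsFrom_stop tl ql (k + (d + 1)) (by omega)]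

-- decomposition of the hit list at an arbitrary later position
lemma hitsFrom_decomp (tl ql : List Char) (d : Nat) :
    ∀ k, ∃ l1, (∀ i ∈ l1, i < k + d) ∧ hitsFrom tl ql k = l1 ++ hitsFrom tl ql (k + d) := by
  induction d with
  | zero => intro k; exact ⟨[], by simp⟩
  | succ d ih =>
    intro k
    by_cases hk : k < tl.length + 1 - ql.length
    · obtain ⟨l1, hlt, heq⟩ := ih (k + 1)
      refine ⟨(if ql <+: tl.drop k then [k] else []) ++ l1, ?_, ?_⟩
      · intro i hi
        rcases List.mem_append.mp hi with hi | hi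
        · split_ifs at hi with hc
          · simp at hi; omega
          · simp at hi
        · have := hlt i hi; omega
      · rw [hitsFrom_step tl ql k hk, heq, List.append_assoc,
            show k + 1 + d = k + (d + 1) by omega]
    · refine ⟨[], by simp, ?_⟩
      rw [hitsFrom_stop tl ql k (by omega), hitsFrom_stop tl ql (k + (d + 1)) (by omega)]
      rfl

-- B's selection pass skips hits that overlap the previous selected span
lemma selectSpansB_skip (m : Nat) (l1 l2 : List Nat) (le : Nat) (spans : List (Int × Int))
    (h : ∀ i ∈ l1, i < le) :
    selectSpansB m (l1 ++ l2) le spans = selectSpansB m l2 le spans := by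
  induction l1 with
  | nil => rfl
  | cons a l1 ih =>
    rw [List.cons_append, selectSpansB, if_pos (h a (by simp))]
    exact ih (fun i hi => h i (by simp [hi]))

-- s.find(q, i) = -1 whenever the start lies past the end of s (CPython quirk kept by PySem).
lemma findFrom_past (tl q : List Char) (k : Int) (h : (tl.length : Int) < k) (h0 : 0 ≤ k) :
    PySem.Chars.findFrom tl q k none = -1 := by
  simp only [PySem.Chars.findFrom]
  rw [if_neg (show ¬ k < 0 by omega), if_pos (by omega)]

-- main invariant: from position k, A's find-jump loop equals B's selection over hitsFrom k
lemma loopA_eq_select (tl ql : List Char) :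
    ∀ (fuel : Nat) (spans : List (Int × Int)) (k : Nat),
      fuel + spans.length = 20 → spans.length < 20 →
      searchLoopA tl ql (k : Int) spans fuel = selectSpansB ql.length (hitsFrom tl ql k) k spans := by
  intro fuel
  induction fuel with
  | zero => intro spans k h20 hlt; omega
  | succ fuel ih =>
    intro spans k h20 hlt
    by_cases hk : k ≤ tl.length
    · rw [searchLoopA]
      simp only
      rw [PySem.Chars.findFrom_natCast tl ql k hk]
      by_cases hr : PySem.Chars.find (tl.drop k) ql = -1
      · rw [if_pos (by rw [hr]; rfl)]
        have hinf : ¬ ql <:+: tl.drop k := by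
          rw [← PySem.Chars.find_eq_neg_one_iff]; exact hr
        have hnil : hitsFrom tl ql k = [] := by
          unfold hitsFrom
          rw [List.filter_eq_nil_iff]
          intro i hi
          have hki : k ≤ i := (List.mem_range'_1.mp hi).1
          intro hpred
          have hp : ql <+: tl.drop i := (pred_iff tl ql i).mp hpred
          refine hinf ?_
          have : ql <+: (tl.drop k).drop (i - k) := by
            rwa [List.drop_drop, show k + (i - k) = i by omega]
          exact this.isInfix.trans (List.drop_suffix _ _).isInfix
        rw [hnil]; rfl
      · have hge := PySem.Chars.neg_one_le_find (tl.drop k) ql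
        rw [if_neg (by simp only [if_neg hr]; omega)]
        simp only [if_neg hr]
        set r := PySem.Chars.find (tl.drop k) ql with hrdef
        have hr0 : 0 ≤ r := by omega
        obtain ⟨hpre0, hmin⟩ := PySem.Chars.find_spec (show (0:Int) ≤ PySem.Chars.find (tl.drop k) ql by omega)
        have hpre : ql <+: tl.drop (k + r.toNat) := by
          rw [← List.drop_drop]; exact hpre0
        have hrle : r ≤ ((tl.drop k).length : Int) := PySem.Chars.find_le_length _ _
        have hkr : k + r.toNat ≤ tl.length := by
          rw [List.length_drop] at hrle; omega
        have hlen : ql.length + (k + r.toNat) ≤ tl.length := by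
          have h1 := hpre.length_le
          rw [List.length_drop] at h1
          omega
        have hE : k + r.toNat < tl.length + 1 - ql.length := by omega
        -- no hit strictly between k and k + r
        have hskip : hitsFrom tl ql k = hitsFrom tl ql (k + r.toNat) := by
          apply hitsFrom_skip
          intro t ht hp
          refine hmin t (by omega) ?_
          rwa [List.drop_drop]
        have hcast : (k : Int) + r = ((k + r.toNat : Nat) : Int) := by push_cast; omega
        rw [hskip, hitsFrom_step tl ql (k + r.toNat) hE, if_pos hpre, List.singleton_append,
            selectSpansB, if_neg (show ¬ (k + r.toNat < k) by omega), hcast]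
        by_cases hfull : 20 ≤ (spans ++ [(((k + r.toNat : Nat) : Int), ((k + r.toNat : Nat) : Int) + (ql.length : Int))]).length
        · rw [if_pos hfull, if_pos hfull]
        · rw [if_neg hfull, if_neg hfull]
          have hmaxcast : ((k + r.toNat : Nat) : Int) + max 1 (ql.length : Int)
              = ((k + r.toNat + max 1 ql.length : Nat) : Int) := by push_cast; omega
          rw [hmaxcast]
          obtain ⟨l1, hl1, hdec⟩ := hitsFrom_decomp tl ql (max 1 ql.length - 1) (k + r.toNat + 1)
          rw [show k + r.toNat + 1 + (max 1 ql.length - 1) = k + r.toNat + max 1 ql.length by omega] at hdec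
          rw [hdec, selectSpansB_skip _ _ _ _ _ (fun i hi => by have := hl1 i hi; omega)]
          exact ih _ _
            (by simp only [List.length_append, List.length_cons, List.length_nil] at h20 ⊢; omega)
            (by simp only [List.length_append, List.length_cons, List.length_nil] at hfull ⊢; omega)
    · rw [searchLoopA]
      simp only
      rw [findFrom_past tl ql k (by omega) (by positivity), if_pos rfl,
          hitsFrom_stop tl ql k (by omega)]
      rfl

-- ===== VERDICT (by name: the statement is the Claim_ definition above) =====
theorem search_in_text_spec : Claim_equal_search_in_text := by
  intro text query _
  unfold Spec_search_in_text search_in_text search_in_text_alt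
  simp only
  rw [← hitsFrom_zero]
  exact loopA_eq_select _ _ 20 [] 0 rfl (by simp)
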